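-- pv_equiv track=rewrite | github.com/AdamZhouSE/pythonHomework | Code/CodeRecords/2908/60686/236547.py | convert
-- ===== SOURCE A (Python) =====
-- import operator
--
-- def convert(arr_input):
--     list_arr = []
--     flag = True
--     for j in range(len(arr_input)):
--         list_arr.append(list(arr_input[j]))
--         for x in range(len(list_arr[j])):
--             if list_arr[j][x] == ' ':
--                 list_arr[j].pop(x)
--                 break
--         list_arr[j].sort()
--     result = [list_arr[0]]
--     for y in range(len(list_arr)):
--         for k in range(len(result)):
--             if operator.eq(list_arr[y],result[k]):
--                 flag = False
--         if flag:
--             result.append(list_arr[y])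
--         flag = True
--     return len(result)
-- ===== SOURCE B (Python) =====
-- def convert(arr_input):
--     def canon(s):
--         chars = list(s)
--         try:
--             chars.remove(' ')
--         except ValueError:
--             pass
--         return sorted(chars)
--     canon_lists = sorted(canon(s) for s in arr_input)
--     prev = canon_lists[0]
--     count = 1
--     for cur in canon_lists[1:]:
--         if cur != prev:
--             count += 1
--         prev = cur
--     return count
-- ===== Notes on version B (the rewrite author's own statement) =====
-- stated objective: faster
-- what changed: Instead of A's quadratic dedup (inner scan of a growing result list per element), B sorts the canonical char lists lexicographically and counts distinct elements in a single linear run-length pass over the sorted list.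
import Mathlib
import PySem

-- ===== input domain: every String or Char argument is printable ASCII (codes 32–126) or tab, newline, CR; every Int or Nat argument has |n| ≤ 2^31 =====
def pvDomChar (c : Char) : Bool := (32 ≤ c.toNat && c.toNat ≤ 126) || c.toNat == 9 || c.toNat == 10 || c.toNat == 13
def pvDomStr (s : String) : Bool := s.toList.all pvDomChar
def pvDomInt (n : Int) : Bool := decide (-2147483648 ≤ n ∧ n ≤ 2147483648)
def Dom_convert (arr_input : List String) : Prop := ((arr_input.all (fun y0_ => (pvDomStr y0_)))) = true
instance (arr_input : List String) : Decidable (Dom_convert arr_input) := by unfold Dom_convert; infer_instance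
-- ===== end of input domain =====

-- B replaces A's quadratic dedup (inner scan of a growing result list per element) by sorting the canonical char lists and counting runs in one linear pass; return-value equivalence on nonempty input (A raises IndexError on []).


-- ===== PORT A =====
-- A's inner loop: scan the char list, pop the FIRST ' ' and break
def pvRemoveFirstSpace : List Char → List Char
  | [] => []
  | c :: rest => if c = ' ' then rest else c :: pvRemoveFirstSpace rest

-- per-string canonicalization of A: list(s), pop first space, sort
def pvCanonA (s : String) : List Char :=
  PySem.List.sorted (pvRemoveFirstSpace s.toList) (fun x => x) false

def convert (arr_input : List String) : Int :=
  let list_arr := arr_input.map pvCanonA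
  match list_arr with
  | [] => 0   -- Python raises IndexError here (list_arr[0]); excluded by Pre_convert
  | c0 :: _ =>
    let result := list_arr.foldl
      (fun res y =>
        let flag := res.foldl (fun f r => if y = r then false else f) true
        if flag then res ++ [y] else res) [c0]
    (result.length : Int)

-- ===== PORT B =====
-- B's canon: list(s); chars.remove(' ') guarded by try/except ValueError; sorted
def pvCanonAlt (s : String) : List Char :=
  let chars := s.toList
  let chars := match PySem.List.remove? chars ' ' with
    | some l => l
    | none => chars
  PySem.List.sorted chars (fun x => x) false

-- B: sort the canonical lists lexicographically, then one run-counting pass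
def convert_alt (arr_input : List String) : Int :=
  let canon_lists := PySem.List.sorted (arr_input.map pvCanonAlt) (fun x => x) false
  match canon_lists with
  | [] => 0   -- Python raises IndexError here (canon_lists[0]); excluded by Pre_convert
  | c0 :: rest =>
    (rest.foldl (fun (acc : Int × List Char) cur =>
        (if cur ≠ acc.2 then acc.1 + 1 else acc.1, cur)) (1, c0)).1

-- ===== PRECONDITION & SPEC =====
-- Pre_ excludes only the empty list, on which A raises IndexError (list_arr[0]).
def Pre_convert (arr_input : List String) : Prop := arr_input ≠ []
instance (arr_input : List String) : Decidable (Pre_convert arr_input) := by unfold Pre_convert; infer_instance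
def pvWitness_convert : List String := ["b ca", "acb", "x"]

def Spec_convert (arr_input : List String) (out : Int) : Prop := out = convert_alt arr_input
instance (arr_input : List String) (out : Int) : Decidable (Spec_convert arr_input out) := by unfold Spec_convert; infer_instance

-- ===== CLAIM (what is proved, stated in full; the proofs are below) =====
def Claim_equal_convert : Prop := ∀ (arr_input : List String), Dom_convert arr_input → Pre_convert arr_input → Spec_convert arr_input (convert arr_input)

-- ===== LEMMAS AND PROOFS =====

-- the two canonicalizations agree: A's find-pop-break = B's remove?-or-keep
theorem pvRemoveFirstSpace_eq (l : List Char) :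
    pvRemoveFirstSpace l = (match PySem.List.remove? l ' ' with | some l' => l' | none => l) := by
  induction l with
  | nil => simp [pvRemoveFirstSpace, PySem.List.remove?]
  | cons c rest ih =>
    by_cases hc : c = ' '
    · subst hc; simp [pvRemoveFirstSpace, PySem.List.remove?_cons_self]
    · rw [PySem.List.remove?_cons_of_ne rest hc]
      simp only [pvRemoveFirstSpace, if_neg hc, ih]
      cases PySem.List.remove? rest ' ' <;> simp

theorem pvCanon_eq (s : String) : pvCanonA s = pvCanonAlt s := by
  simp [pvCanonA, pvCanonAlt, pvRemoveFirstSpace_eq]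

-- A's flag inner scan computes membership
theorem flag_eq (y : List Char) (res : List (List Char)) (b : Bool) :
    res.foldl (fun f r => if y = r then false else f) b = (b && !(decide (y ∈ res))) := by
  induction res generalizing b with
  | nil => simp
  | cons r rest ih =>
    simp only [List.foldl_cons, ih, List.mem_cons]
    by_cases h : y = r <;> simp [h]

-- A's dedup step is Set.add
theorem step_eq_add (res : List (List Char)) (y : List Char) :
    (let flag := res.foldl (fun f r => if y = r then false else f) true
     if flag then res ++ [y] else res) = PySem.Set.add res y := by
  simp only [flag_eq, Bool.true_and, PySem.Set.add_eq_ite]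
  by_cases h : y ∈ res <;> simp [h]

-- A computes the number of distinct canonical lists
theorem convert_eq_card (arr_input : List String) (h : arr_input ≠ []) :
    convert arr_input = (((arr_input.map pvCanonAlt).toFinset.card : Nat) : Int) := by
  unfold convert
  rw [show arr_input.map pvCanonA = arr_input.map pvCanonAlt from List.map_congr_left (fun s _ => pvCanon_eq s)]
  cases hm : arr_input.map pvCanonAlt with
  | nil => exact absurd (List.map_eq_nil_iff.mp hm) h
  | cons c0 rest =>
    have hfun : (fun (res : List (List Char)) (y : List Char) =>
        let flag := res.foldl (fun f r => if y = r then false else f) true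
        if flag then res ++ [y] else res) = PySem.Set.add := by
      funext res y; exact step_eq_add res y
    simp only [hfun]
    have hset : ((c0 :: rest).foldl PySem.Set.add [c0]) = PySem.Set.ofList (c0 :: rest) := by
      rw [PySem.Set.ofList_eq_foldl]
      simp only [List.foldl_cons]
      congr 1
      rw [PySem.Set.add_of_mem (show c0 ∈ [c0] by simp)]
      rfl
    rw [hset]
    congr 1
    rw [← List.toFinset_card_of_nodup (PySem.Set.nodup_ofList (c0 :: rest))]
    congr 1
    apply Finset.ext
    intro x
    simp [PySem.Set.mem_ofList]

-- B's run-counting pass over a ≤-sorted list counts distinct elements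
theorem run_count (l : List (List Char)) (prev : List Char) (k : Int)
    (h : (prev :: l).Pairwise (· ≤ ·)) :
    (l.foldl (fun (acc : Int × List Char) cur =>
        (if cur ≠ acc.2 then acc.1 + 1 else acc.1, cur)) (k, prev)).1
      = k + (((prev :: l).toFinset.card : Nat) : Int) - 1 := by
  induction l generalizing prev k with
  | nil => simp
  | cons c rest ih =>
    have hpc : prev ≤ c := (List.pairwise_cons.mp h).1 c (by simp)
    have hrest : (c :: rest).Pairwise (· ≤ ·) := (List.pairwise_cons.mp h).2
    simp only [List.foldl_cons]
    by_cases hc : c = prev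
    · subst hc
      rw [if_neg (by simp)]
      rw [ih c k hrest]
      have : (c :: c :: rest).toFinset = (c :: rest).toFinset := by
        simp [List.toFinset_cons]
      rw [this]
    · rw [if_pos (by simpa using hc)]
      rw [ih c (k + 1) hrest]
      have hlt : prev < c := lt_of_le_of_ne hpc (fun e => hc e.symm)
      have hnotmem : prev ∉ (c :: rest).toFinset := by
        simp only [List.mem_toFinset, List.mem_cons]
        rintro (rfl | hm)
        · exact absurd rfl (ne_of_lt hlt)
        · have : c ≤ prev := (List.pairwise_cons.mp hrest).1 prev hm
          exact absurd (lt_of_lt_of_le hlt this) (lt_irrefl prev)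
      have : (prev :: c :: rest).toFinset.card = (c :: rest).toFinset.card + 1 := by
        rw [List.toFinset_cons, Finset.card_insert_of_notMem hnotmem]
      rw [this]
      push_cast
      ring

theorem convert_spec' (arr_input : List String) (h : arr_input ≠ []) :
    convert arr_input = convert_alt arr_input := by
  rw [convert_eq_card arr_input h]
  unfold convert_alt
  cases hs : PySem.List.sorted (arr_input.map pvCanonAlt) (fun x => x) false with
  | nil =>
    exact absurd (List.map_eq_nil_iff.mp ((PySem.List.sorted_eq_nil_iff _ _ _).mp hs)) h
  | cons c0 rest =>
    have hsorted : (c0 :: rest).Pairwise (fun a b => a ≤ b) := by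
      have hp := PySem.List.sorted_pairwise (κ := List Char) (arr_input.map pvCanonAlt) (fun x => x)
      rw [← hs]
      convert hp using 2
    have := run_count rest c0 1 hsorted
    simp only [this]
    have hperm : (c0 :: rest).Perm (arr_input.map pvCanonAlt) := by
      rw [← hs]; exact PySem.List.sorted_perm _ _ _
    rw [List.toFinset_eq_of_perm _ _ hperm]
    ring

-- ===== VERDICT (by name: the statement is the Claim_ definition above) =====
theorem convert_spec : Claim_equal_convert := by
  intro arr_input _ hpre
  exact convert_spec' arr_input hpre
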